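-- pv_equiv track=rewrite | github.com/milanshaju02-netizen/Smart-lecture-notes | app.py | chunk_segments_by_word_limit
-- ===== SOURCE A (Python) =====
-- def chunk_segments_by_word_limit(segments, max_words=180):
--     grouped = []
--     current_group = []
--     current_word_count = 0
--
--     for seg in segments:
--         wc = len(seg["text"].split())
--
--         if current_group and current_word_count + wc > max_words:
--             grouped.append(current_group)
--             current_group = []
--             current_word_count = 0
--
--         current_group.append(seg)
--         current_word_count += wc
--
--     if current_group:
--         grouped.append(current_group)
--
--     return grouped
-- ===== SOURCE B (Python) =====
-- def chunk_segments_by_word_limit(segments, max_words=180):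
--     if not segments:
--         return []
--     wcs = [len(seg["text"].split()) for seg in segments]
--     cuts = []
--     start = 0
--     running = 0
--     for i, wc in enumerate(wcs):
--         if i > start and running + wc > max_words:
--             cuts.append(i)
--             start = i
--             running = 0
--         running += wc
--     bounds = [0] + cuts + [len(segments)]
--     return [segments[a:b] for a, b in zip(bounds, bounds[1:])]
-- ===== Notes on version B (the rewrite author's own statement) =====
-- stated objective: alternative
-- what changed: Instead of accumulating the groups themselves in one flush-and-reset pass, B works in three stages on indices: it first maps every segment to its word count, then scans the counts to compute only the list of cut positions (boundary indices), and finally reconstructs the chunks by slicing the original list between consecutive boundaries.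
import Mathlib
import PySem

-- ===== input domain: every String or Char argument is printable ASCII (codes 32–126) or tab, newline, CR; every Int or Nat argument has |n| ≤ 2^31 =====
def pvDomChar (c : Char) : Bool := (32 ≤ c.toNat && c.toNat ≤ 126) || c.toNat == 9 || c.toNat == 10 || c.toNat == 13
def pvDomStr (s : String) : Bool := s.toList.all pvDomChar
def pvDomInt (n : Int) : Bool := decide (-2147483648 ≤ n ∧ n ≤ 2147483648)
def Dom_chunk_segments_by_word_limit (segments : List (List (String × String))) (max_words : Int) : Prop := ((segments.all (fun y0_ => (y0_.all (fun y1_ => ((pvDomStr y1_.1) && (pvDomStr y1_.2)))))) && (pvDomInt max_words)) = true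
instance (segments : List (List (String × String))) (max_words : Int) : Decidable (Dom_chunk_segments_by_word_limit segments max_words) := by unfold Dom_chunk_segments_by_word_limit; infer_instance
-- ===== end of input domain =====

-- B replaces A's single flush-and-reset accumulation of the groups by three staged passes:
-- word counts, then boundary (cut) indices, then slicing the list between consecutive bounds
-- (objective: alternative decomposition, same cost).

-- wc = len(seg["text"].split())  (shared by both ports; Pre_ guarantees the key exists)
def pvWC (seg : List (String × String)) : Int :=
  Int.ofNat (PySem.Str.split₀ ((PySem.Dict.get? (PySem.Dict.mk seg) "text").getD "")).length

-- ===== PORT A =====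
-- one iteration of A's for-loop over state (grouped, current_group, current_word_count)
def pvStepA (max_words : Int)
    (st : List (List (List (String × String))) × List (List (String × String)) × Int)
    (seg : List (String × String)) :
    List (List (List (String × String))) × List (List (String × String)) × Int :=
  let wc := pvWC seg
  if st.2.1 ≠ [] ∧ st.2.2 + wc > max_words then
    (st.1 ++ [st.2.1], [seg], wc)
  else
    (st.1, st.2.1 ++ [seg], st.2.2 + wc)

def chunk_segments_by_word_limit (segments : List (List (String × String))) (max_words : Int) : List (List (List (String × String))) :=
  let st := segments.foldl (pvStepA max_words) ([], [], 0)
  if st.2.1 ≠ [] then st.1 ++ [st.2.1] else st.1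

-- ===== PORT B =====
-- one iteration of B's boundary-finding loop over state (cuts, start, running); p = (i, wc)
def pvStepB (max_words : Int) (st : List Int × Int × Int) (p : Int × Int) : List Int × Int × Int :=
  let st' := if p.1 > st.2.1 ∧ st.2.2 + p.2 > max_words then (st.1 ++ [p.1], p.1, (0 : Int)) else st
  (st'.1, st'.2.1, st'.2.2 + p.2)

def chunk_segments_by_word_limit_alt (segments : List (List (String × String))) (max_words : Int) : List (List (List (String × String))) :=
  if segments = [] then []
  else
    let wcs := segments.map pvWC
    let st := (PySem.List.enumerate wcs 0).foldl (pvStepB max_words) ([], 0, 0)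
    let bounds := (0 : Int) :: st.1 ++ [(segments.length : Int)]
    (bounds.zip bounds.tail).map (fun p => PySem.List.slice segments (some p.1) (some p.2))

-- ===== PRECONDITION & SPEC =====
-- Pre_ excludes exactly the inputs where some segment has no "text" key: there A (and B) raise KeyError.
def Pre_chunk_segments_by_word_limit (segments : List (List (String × String))) (_max_words : Int) : Prop :=
  segments.all (fun seg => (PySem.Dict.get? (PySem.Dict.mk seg) "text").isSome) = true
instance (segments : List (List (String × String))) (max_words : Int) : Decidable (Pre_chunk_segments_by_word_limit segments max_words) := by unfold Pre_chunk_segments_by_word_limit; infer_instance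

def pvWitness_chunk_segments_by_word_limit : (List (List (String × String))) × Int :=
  ([[("text", "hello world")], [("text", "a b c")]], 3)

def Spec_chunk_segments_by_word_limit (segments : List (List (String × String))) (max_words : Int) (out : List (List (List (String × String)))) : Prop := out = chunk_segments_by_word_limit_alt segments max_words
instance (segments : List (List (String × String))) (max_words : Int) (out : List (List (List (String × String)))) : Decidable (Spec_chunk_segments_by_word_limit segments max_words out) := by unfold Spec_chunk_segments_by_word_limit; infer_instance

-- ===== CLAIM (what is proved, stated in full; the proofs are below) =====
def Claim_equal_chunk_segments_by_word_limit : Prop := ∀ (segments : List (List (String × String))) (max_words : Int), Dom_chunk_segments_by_word_limit segments max_words → Pre_chunk_segments_by_word_limit segments max_words → Spec_chunk_segments_by_word_limit segments max_words (chunk_segments_by_word_limit segments max_words)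

-- ===== LEMMAS AND PROOFS =====

-- the chunks cut out of `segments` by consecutive members of a boundary list
def pvSlices (segments : List (List (String × String))) (bs : List Int) : List (List (List (String × String))) :=
  (bs.zip bs.tail).map (fun p => PySem.List.slice segments (some p.1) (some p.2))

theorem pvSlices_snoc (segments : List (List (String × String))) (x : Int) (bs : List Int) (b : Int) :
    pvSlices segments ((x :: bs) ++ [b])
      = pvSlices segments (x :: bs)
        ++ [PySem.List.slice segments (some ((x :: bs).getLast (by simp))) (some b)] := by
  induction bs generalizing x with
  | nil => simp [pvSlices]
  | cons y ys ih =>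
      have h := ih y
      simp only [pvSlices, List.cons_append, List.zip_cons_cons, List.tail_cons, List.map_cons] at h ⊢
      rw [h]
      simp

theorem pvMain (mw : Int) (segments : List (List (String × String))) :
    ∀ (rest : List (List (String × String))) (i start : Nat) (cuts : List Nat)
      (grouped : List (List (List (String × String)))) (cur : List (List (String × String))) (running : Int),
    rest = segments.drop i →
    i ≤ segments.length →
    start ≤ i →
    cur ≠ [] →
    cur = (segments.drop start).take (i - start) →
    grouped = pvSlices segments ((0 : Int) :: cuts.map Int.ofNat) →
    ((0 : Int) :: cuts.map Int.ofNat).getLast (by simp) = (start : Int) →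
    (let stA := rest.foldl (pvStepA mw) (grouped, cur, running);
     if stA.2.1 ≠ [] then stA.1 ++ [stA.2.1] else stA.1)
    = pvSlices segments
        ((0 : Int) :: ((PySem.List.enumerate (rest.map pvWC) (i : Int)).foldl (pvStepB mw)
            (cuts.map Int.ofNat, (start : Int), running)).1
          ++ [(segments.length : Int)]) := by
  intro rest
  induction rest with
  | nil =>
      intro i start cuts grouped cur running hrest hi hsi hne hcur hgrp hlast
      have hin : i = segments.length := by
        have := (List.drop_eq_nil_iff).1 hrest.symm
        omega
      simp only [List.map_nil, PySem.List.enumerate_nil, List.foldl_nil, hne, if_pos, ne_eq,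
        not_false_iff]
      rw [pvSlices_snoc segments 0 (cuts.map Int.ofNat) ((segments.length : Int)), hlast,
        PySem.List.slice_natCast, ← hin, ← hcur, ← hgrp]
  | cons s rest' ih =>
      intro i start cuts grouped cur running hrest hi hsi hne hcur hgrp hlast
      have hdrop : segments.drop i = s :: rest' := hrest.symm
      have hilt : i < segments.length := by
        by_contra h
        rw [List.drop_eq_nil_iff.2 (by omega)] at hdrop
        simp at hdrop
      have hgi : segments[i]? = some s := by
        have h0 : (segments.drop i)[0]? = segments[i + 0]? := List.getElem?_drop
        rw [hdrop] at h0
        simpa using h0.symm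
      have hlt : start < i := by
        rcases Nat.lt_or_ge start i with h | h
        · exact h
        · exfalso
          apply hne
          rw [hcur]
          have : i - start = 0 := by omega
          simp [this]
      have hdrop' : segments.drop (i + 1) = rest' := by
        rw [← List.drop_drop]
        simp [hdrop]
      by_cases hflush : running + pvWC s > mw
      · -- flush: a cut is recorded at i, a new group starts with s
        have hstepA : pvStepA mw (grouped, cur, running) s = (grouped ++ [cur], [s], pvWC s) := by
          simp [pvStepA, hne, hflush]
        have hstepB : pvStepB mw (cuts.map Int.ofNat, (start : Int), running) ((i : Int), pvWC s)
            = (cuts.map Int.ofNat ++ [(i : Int)], (i : Int), 0 + pvWC s) := by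
          have : ((i : Int) > (start : Int)) := by exact_mod_cast hlt
          simp [pvStepB, this, hflush]
        simp only [List.map_cons, PySem.List.enumerate_cons, List.foldl_cons, hstepA, hstepB]
        have hmap : cuts.map Int.ofNat ++ [(i : Int)] = (cuts ++ [i]).map Int.ofNat := by simp
        have hcast : ((i : Int) + 1) = ((i + 1 : Nat) : Int) := by push_cast; ring
        rw [hmap, hcast, zero_add,
          ih (i + 1) i (cuts ++ [i]) (grouped ++ [cur]) [s] (pvWC s) hdrop'.symm (by omega)
            (by omega) (by simp)
            (by
              have : (segments.drop i).take 1 = [s] := by simp [hdrop]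
              simpa using this.symm)
            (by
              have h2 := pvSlices_snoc segments 0 (cuts.map Int.ofNat) ((i : Int))
              simp only [List.cons_append] at h2
              rw [hgrp, ← hmap, h2, hlast, PySem.List.slice_natCast, ← hcur])
            (by simp)]
      · -- no flush: s joins the current group
        have hstepA : pvStepA mw (grouped, cur, running) s = (grouped, cur ++ [s], running + pvWC s) := by
          simp [pvStepA, hflush]
        have hstepB : pvStepB mw (cuts.map Int.ofNat, (start : Int), running) ((i : Int), pvWC s)
            = (cuts.map Int.ofNat, (start : Int), running + pvWC s) := by
          simp [pvStepB, hflush]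
        simp only [List.map_cons, PySem.List.enumerate_cons, List.foldl_cons, hstepA, hstepB]
        have hcast : ((i : Int) + 1) = ((i + 1 : Nat) : Int) := by push_cast; ring
        rw [hcast,
          ih (i + 1) start cuts grouped (cur ++ [s]) (running + pvWC s) hdrop'.symm (by omega)
            (by omega) (by simp)
            (by
              have h1 : i + 1 - start = (i - start) + 1 := by omega
              have h2 : (segments.drop start)[i - start]? = some s := by
                rw [List.getElem?_drop]
                have : start + (i - start) = i := by omega
                rw [this, hgi]
              rw [h1, List.take_add_one, h2, ← hcur]
              simp)
            hgrp hlast]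

-- ===== VERDICT (by name: the statement is the Claim_ definition above) =====
theorem chunk_segments_by_word_limit_spec : Claim_equal_chunk_segments_by_word_limit := by
  intro segments max_words _ _
  unfold Spec_chunk_segments_by_word_limit chunk_segments_by_word_limit chunk_segments_by_word_limit_alt
  cases segments with
  | nil => simp
  | cons s rest =>
      simp only [List.map_cons, PySem.List.enumerate_cons, List.foldl_cons, reduceCtorEq,
        if_neg, ne_eq, not_false_iff]
      have hstepA : pvStepA max_words ([], [], 0) s = ([], [s], 0 + pvWC s) := by
        simp [pvStepA]
      have hstepB : pvStepB max_words ([], 0, 0) ((0 : Int), pvWC s) = ([], 0, 0 + pvWC s) := by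
        simp [pvStepB]
      rw [hstepA, hstepB, zero_add]
      have := pvMain max_words (s :: rest) rest 1 0 [] [] [s] (pvWC s)
        (by simp) (by simp) (by omega) (by simp)
        (by simp) (by simp [pvSlices]) (by simp)
      simpa using this
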